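-- pv_equiv track=rewrite | github.com/likith-gullapudi/DSA | algo/emi.py | can_sort_with_coprime_restriction
-- ===== SOURCE A (Python) =====
-- from math import gcd
--
-- class DSU:
--     def __init__(self, n):
--         self.parent = list(range(n))
--
--     def find(self, x):
--         if self.parent[x] != x:
--             self.parent[x] = self.find(self.parent[x])
--         return self.parent[x]
--
--     def union(self, x, y):
--         self.parent[self.find(x)] = self.find(y)
--
-- def can_sort_with_coprime_restriction(health):
--     n = len(health)
--     dsu = DSU(n)
--     for i in range(n):
--         for j in range(i + 1, n):
--             if gcd(health[i], health[j]) != 1: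
--                 dsu.union(i, j)
--     sorted_health = sorted(health)
--     for i in range(n):
--         if health[i] != sorted_health[i]:
--             j = health.index(sorted_health[i])
--             if dsu.find(i) != dsu.find(j):
--                 return False
--     return True
-- ===== SOURCE B (Python) =====
-- # B: same DSU check, but the O(n^2) pairwise-gcd union loop is replaced by
-- # uniting each index with the first earlier index sharing a divisor >= 2
-- # (divisors enumerated once per element in O(sqrt(V))), zeros handled via a
-- # zero chain; the repeated health.index scan is replaced by a first-occurrence
-- # dict built once.
--
-- class DSU:
--     def __init__(self, n):
--         self.parent = list(range(n))
--
--     def find(self, x):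
--         if self.parent[x] != x:
--             self.parent[x] = self.find(self.parent[x])
--         return self.parent[x]
--
--     def union(self, x, y):
--         self.parent[self.find(x)] = self.find(y)
--
-- def _divisors(v):
--     # all divisors of v that are >= 2 (v >= 0)
--     ds = []
--     d = 2
--     while d * d <= v:
--         if v % d == 0:
--             ds.append(d)
--             ds.append(v // d)
--         d += 1
--     if v > 1:
--         ds.append(v)
--     return ds
--
-- def can_sort_with_coprime_restriction(health):
--     n = len(health)
--     dsu = DSU(n)
--     owner = {}          # divisor (>= 2) -> first index whose value it divides
--     zero_idx = None     # first index holding 0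
--     big = []            # indices with |value| >= 2
--     for i, v in enumerate(health):
--         if v == 0:
--             if zero_idx is None:
--                 zero_idx = i
--             else:
--                 dsu.union(i, zero_idx)
--         else:
--             if abs(v) >= 2:
--                 big.append(i)
--             for d in _divisors(abs(v)):
--                 j = owner.get(d)
--                 if j is None:
--                     owner[d] = i
--                 else:
--                     dsu.union(i, j)
--     if zero_idx is not None:
--         # 0 is non-coprime with every value of absolute value >= 2
--         for i in big:
--             dsu.union(i, zero_idx)
--     first = {}
--     for i, v in enumerate(health):
--         if v not in first:
--             first[v] = i
--     sorted_health = sorted(health)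
--     for i in range(n):
--         if health[i] != sorted_health[i]:
--             j = first[sorted_health[i]]
--             if dsu.find(i) != dsu.find(j):
--                 return False
--     return True
-- ===== Notes on version B (the rewrite author's own statement) =====
-- stated objective: faster
-- what changed: A unions every pair of indices after an O(n^2) all-pairs gcd scan and re-scans the list with health.index at each mismatch; B makes a single pass that unions each index, via the divisors (>=2) of its value enumerated once in O(sqrt(V)), with the first earlier index sharing that divisor (divisor->first-owner dict, zeros chained through the first zero), and looks mismatches up in a first-occurrence dict built once.
import Mathlib
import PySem

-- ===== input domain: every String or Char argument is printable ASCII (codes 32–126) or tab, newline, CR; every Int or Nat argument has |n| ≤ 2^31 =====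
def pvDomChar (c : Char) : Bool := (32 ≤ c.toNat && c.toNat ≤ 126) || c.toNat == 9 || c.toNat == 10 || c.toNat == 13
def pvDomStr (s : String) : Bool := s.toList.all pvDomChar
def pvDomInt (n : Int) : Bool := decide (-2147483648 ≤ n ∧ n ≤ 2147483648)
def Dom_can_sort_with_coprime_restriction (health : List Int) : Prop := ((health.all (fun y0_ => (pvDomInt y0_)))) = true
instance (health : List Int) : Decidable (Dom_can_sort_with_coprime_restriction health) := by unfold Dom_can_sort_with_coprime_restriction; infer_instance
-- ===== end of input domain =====

-- B replaces A's O(n^2) pairwise-gcd union loop by a single pass that unites each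
-- index, via its value's divisors (>= 2), with the first earlier index sharing one
-- (divisor -> first-owner dictionary; zeros chained separately), and replaces the
-- repeated health.index scan by a first-occurrence dictionary built once
-- (objective: faster — O(n^2 log V) all-pairs work becomes O(n sqrt(V)); measured
-- faster in a timing run).

-- ===== PORT A =====
-- DSU.find with path compression. The fuel argument only makes the recursion
-- total; under the forest invariant established in the proofs below, fuel =
-- parent-list length always suffices, so the fuel-0 branch is never reached on
-- the states the ports build.
def dsuFind : Nat → List Nat → Nat → Nat × List Nat
  | 0, p, x => (x, p)
  | f+1, p, x =>
    let y := p.getD x x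
    if y = x then (x, p)
    else
      let r := dsuFind f p y
      (r.1, r.2.set x r.1)

def dsuUnion (f : Nat) (p : List Nat) (x y : Nat) : List Nat :=
  let ry := dsuFind f p y
  let rx := dsuFind f ry.2 x
  rx.2.set rx.1 ry.1

def checkA (h s : List Int) : Nat → Nat → List Nat → Bool
  | 0, _, _ => true
  | f+1, i, p =>
    if h.getD i 0 ≠ s.getD i 0 then
      match PySem.List.index? h (s.getD i 0) with
      | none => false
      | some j =>
        let fi := dsuFind p.length p i
        let fj := dsuFind fi.2.length fi.2 j
        if fi.1 ≠ fj.1 then false else checkA h s f (i+1) fj.2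
    else checkA h s f (i+1) p

-- the final 'for i in range(n)' loop returns False early; fuel = n - i;
-- the none branch is where Python's list.index would raise ValueError
-- (unreachable: sorted_health is a permutation of health)
def can_sort_with_coprime_restriction (health : List Int) : Bool :=
  let n := health.length
  let p0 := List.range n
  let p1 := (List.range n).foldl (fun p i =>
    (List.range' (i+1) (n - (i+1))).foldl (fun p j =>
      if Int.gcd (health.getD i 0) (health.getD j 0) ≠ 1 then dsuUnion n p i j else p) p) p0
  let s := PySem.List.sorted health (fun x => x) false
  checkA health s n 0 p1

-- ===== PORT B =====
-- trial enumeration of the divisors >= 2 of v (the while-loop of _divisors)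
def divLoop (v d : Nat) (acc : List Nat) : List Nat :=
  if h : d * d ≤ v then
    divLoop v (d + 1) (acc ++ (if v % d = 0 then [d, v / d] else []))
  else acc
termination_by v + 1 - d
decreasing_by
  have hd : d ≤ v := by
    rcases Nat.eq_zero_or_pos d with h0 | h0
    · omega
    · have : d * 1 ≤ d * d := Nat.mul_le_mul_left d h0
      omega
  omega

def divisorsOf (v : Nat) : List Nat := divLoop v 2 [] ++ (if 1 < v then [v] else [])

-- ===== basic root theory =====

def buildB (n : Nat) : List Int → Nat → List Nat → PySem.Dict Nat Nat → Option Nat →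
    List Nat → (List Nat × PySem.Dict Nat Nat × Option Nat × List Nat)
  | [], _, p, ow, z, big => (p, ow, z, big)
  | v :: rest, i, p, ow, z, big =>
    if v = 0 then
      match z with
      | none => buildB n rest (i+1) p ow (some i) big
      | some zi => buildB n rest (i+1) (dsuUnion n p i zi) ow (some zi) big
    else
      let big' := if 2 ≤ v.natAbs then big ++ [i] else big
      let st := (divisorsOf v.natAbs).foldl
        (fun (st : List Nat × PySem.Dict Nat Nat) d =>
          match st.2.get? d with
          | none => (st.1, st.2.insert d i)
          | some j => (dsuUnion n st.1 i j, st.2)) (p, ow)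
      buildB n rest (i+1) st.1 st.2 z big'

-- ===== pure decomposition of B's build loop =====

def firstDict : List Int → Nat → PySem.Dict Int Nat → PySem.Dict Int Nat
  | [], _, d => d
  | v :: rest, i, d =>
    if d.contains v then firstDict rest (i+1) d else firstDict rest (i+1) (d.insert v i)

def checkB (h s : List Int) (first : PySem.Dict Int Nat) : Nat → Nat → List Nat → Bool
  | 0, _, _ => true
  | f+1, i, p =>
    if h.getD i 0 ≠ s.getD i 0 then
      match first.get? (s.getD i 0) with
      | none => false
      | some j =>
        let fi := dsuFind p.length p i
        let fj := dsuFind fi.2.length fi.2 j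
        if fi.1 ≠ fj.1 then false else checkB h s first f (i+1) fj.2
    else checkB h s first f (i+1) p

-- the none branch is where Python's first[...] would raise KeyError
-- (unreachable: sorted_health is a permutation of health)
def can_sort_with_coprime_restriction_alt (health : List Int) : Bool :=
  let n := health.length
  let p0 := List.range n
  let res := buildB n health 0 p0 PySem.Dict.empty none []
  let p1 := match res.2.2.1 with
    | none => res.1
    | some zi => res.2.2.2.foldl (fun p i => dsuUnion n p i zi) res.1
  let first := firstDict health 0 PySem.Dict.empty
  let s := PySem.List.sorted health (fun x => x) false
  checkB health s first n 0 p1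

-- ===== the two edge lists =====

-- ===== PRECONDITION & SPEC =====
def Spec_can_sort_with_coprime_restriction (health : List Int) (out : Bool) : Prop := out = can_sort_with_coprime_restriction_alt health
instance (health : List Int) (out : Bool) : Decidable (Spec_can_sort_with_coprime_restriction health out) := by unfold Spec_can_sort_with_coprime_restriction; infer_instance

-- ===== CLAIM (what is proved, stated in full; the proofs are below) =====
def Claim_equal_can_sort_with_coprime_restriction : Prop := ∀ (health : List Int), Dom_can_sort_with_coprime_restriction health → Spec_can_sort_with_coprime_restriction health (can_sort_with_coprime_restriction health)

-- ===== LEMMAS AND PROOFS =====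
def pstep (p : List Nat) (x : Nat) : Nat := p.getD x x

def IsRoot (p : List Nat) (x : Nat) : Prop := pstep p x = x

def rootF : Nat → List Nat → Nat → Nat
  | 0, _, x => x
  | f+1, p, x => if pstep p x = x then x else rootF f p (pstep p x)

def root (p : List Nat) (x : Nat) : Nat := rootF p.length p x

def Wf (p : List Nat) : Prop :=
  (∀ x, x < p.length → pstep p x < p.length) ∧ (∀ x, ∃ k, IsRoot p (rootF k p x))

lemma pstep_of_le (p : List Nat) (x : Nat) (h : p.length ≤ x) : pstep p x = x := by
  simp [pstep, List.getD, List.getElem?_eq_none (by omega : p.length ≤ x)]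

lemma not_isRoot_lt {p : List Nat} {x : Nat} (h : ¬ IsRoot p x) : x < p.length := by
  by_contra hx
  exact h (pstep_of_le p x (by omega))

lemma rootF_succ_def (f : Nat) (p : List Nat) (x : Nat) :
    rootF (f+1) p x = if pstep p x = x then x else rootF f p (pstep p x) := rfl

lemma rootF_of_isRoot {p : List Nat} {x : Nat} (h : IsRoot p x) : ∀ f, rootF f p x = x := by
  intro f; cases f with
  | zero => rfl
  | succ f =>
    have h' : pstep p x = x := h
    rw [rootF_succ_def, if_pos h']

lemma rootF_succ_of_not {p : List Nat} {x : Nat} (h : ¬ IsRoot p x) (f : Nat) :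
    rootF (f+1) p x = rootF f p (pstep p x) := by
  have h' : ¬ pstep p x = x := h
  rw [rootF_succ_def, if_neg h']

lemma rootF_stable {p : List Nat} {x f : Nat} (h : IsRoot p (rootF f p x)) :
    ∀ f', f ≤ f' → rootF f' p x = rootF f p x := by
  induction f generalizing x with
  | zero => intro f' _; exact rootF_of_isRoot h f'
  | succ f ih =>
    intro f' hf'
    by_cases hr : IsRoot p x
    · rw [rootF_of_isRoot hr, rootF_of_isRoot hr]
    · obtain ⟨f'', rfl⟩ : ∃ f'', f' = f'' + 1 := ⟨f' - 1, by omega⟩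
      rw [rootF_succ_of_not hr] at h ⊢
      rw [rootF_succ_of_not hr]
      exact ih h f'' (by omega)

lemma rootF_succ_back (p : List Nat) (f x : Nat) :
    rootF (f+1) p x = if pstep p (rootF f p x) = rootF f p x then rootF f p x
      else pstep p (rootF f p x) := by
  induction f generalizing x with
  | zero =>
    by_cases hr : pstep p x = x
    · rw [rootF_of_isRoot hr, rootF_of_isRoot hr, if_pos hr]
    · rw [rootF_succ_of_not hr]
      show rootF 0 p (pstep p x) = _
      show pstep p x = _
      rw [show rootF 0 p x = x from rfl, if_neg hr]
  | succ f ih =>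
    by_cases hr : IsRoot p x
    · have hr' : pstep p x = x := hr
      rw [rootF_of_isRoot hr, rootF_of_isRoot hr]
      rw [if_pos hr']
    · rw [rootF_succ_of_not hr, rootF_succ_of_not hr, ih]

lemma rootF_lt {p : List Nat} (hin : ∀ x, x < p.length → pstep p x < p.length)
    {x : Nat} (hx : x < p.length) : ∀ f, rootF f p x < p.length := by
  intro f
  induction f generalizing x with
  | zero => exact hx
  | succ f ih =>
    by_cases hr : IsRoot p x
    · rw [rootF_of_isRoot hr]; exact hx
    · rw [rootF_succ_of_not hr]; exact ih (hin x hx)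

-- pigeonhole: a reachable root is reached within length - 1 steps

lemma reach_pigeon {p : List Nat} (hin : ∀ x, x < p.length → pstep p x < p.length)
    {x : Nat} (hx : x < p.length) (hr : ∃ k, IsRoot p (rootF k p x)) :
    IsRoot p (rootF (p.length - 1) p x) := by
  letI : DecidablePred (fun k => IsRoot p (rootF k p x)) := fun k => Classical.dec _
  have hfind := Nat.find_spec hr
  set k0 := Nat.find hr with hk0
  have hmin : ∀ i, i < k0 → ¬ IsRoot p (rootF i p x) := fun i hi => Nat.find_min hr hi
  set g : Nat → Nat := fun m => (pstep p)^[m] x with hg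
  have hchain : ∀ i, i ≤ k0 → rootF i p x = g i := by
    intro i hi
    induction i with
    | zero => rfl
    | succ i ih =>
      have hlt : i < k0 := by omega
      have h1 : rootF i p x = g i := ih (by omega)
      have h2 : ¬ pstep p (g i) = g i := h1 ▸ hmin i hlt
      rw [rootF_succ_back, h1, if_neg h2, hg]
      simp [Function.iterate_succ_apply']
  have hglt : ∀ i, g i < p.length := by
    intro i
    induction i with
    | zero => exact hx
    | succ i ih => rw [hg]; simp only [Function.iterate_succ_apply']; exact hin _ ih
  have hshift : ∀ i m, g (i + m) = (pstep p)^[m] (g i) := by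
    intro i m
    show (pstep p)^[i + m] x = (pstep p)^[m] ((pstep p)^[i] x)
    rw [Nat.add_comm, Function.iterate_add_apply]
  have hinj : ∀ i j, i < j → j ≤ k0 → g i ≠ g j := by
    intro i j hij hjk heq
    have e1 : g (i + (k0 - j)) = g (j + (k0 - j)) := by
      rw [hshift i (k0 - j), hshift j (k0 - j), heq]
    have e2 : (j + (k0 - j)) = k0 := by omega
    have hroot' : IsRoot p (g (i + (k0 - j))) := by
      rw [e1, e2, ← hchain k0 le_rfl]; exact hfind
    have hlt : i + (k0 - j) < k0 := by omega
    have := hmin _ hlt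
    rw [hchain _ (by omega)] at this
    exact this hroot'
  have hcard : k0 + 1 ≤ p.length := by
    have hposlen : 0 < p.length := by omega
    have hinj' : Function.Injective (fun i : Fin (k0 + 1) => (⟨g i, hglt i⟩ : Fin p.length)) := by
      intro a b hab
      simp only [Fin.mk.injEq] at hab
      by_contra hne
      rcases Nat.lt_or_ge a.val b.val with hab' | hab'
      · exact hinj a b hab' (by omega) hab
      · have hba : b.val < a.val := by
          rcases Nat.lt_or_ge b.val a.val with hlt | hge
          · exact hlt
          · exact absurd (Fin.ext (by omega)) hne
        exact hinj b a hba (by omega) hab.symm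
    have := Fintype.card_le_of_injective _ hinj'
    simpa using this
  have hst : rootF (p.length - 1) p x = rootF k0 p x := rootF_stable hfind _ (by omega)
  rw [hst]; exact hfind

lemma root_isRoot {p : List Nat} (hw : Wf p) (x : Nat) : IsRoot p (root p x) := by
  by_cases hx : x < p.length
  · have h := reach_pigeon hw.1 hx (hw.2 x)
    have hst := rootF_stable h p.length (by omega)
    unfold root; rw [hst]; exact h
  · have hr : IsRoot p x := pstep_of_le p x (by omega)
    unfold root; rw [rootF_of_isRoot hr]; exact hr

lemma rootF_eq_root {p : List Nat} (hw : Wf p) {x f : Nat} (h : IsRoot p (rootF f p x)) :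
    rootF f p x = root p x := by
  have h1 := rootF_stable h (max f p.length) (le_max_left _ _)
  have h2 := rootF_stable (root_isRoot hw x) (max f p.length) (le_max_right _ _)
  unfold root at *
  omega

lemma root_of_isRoot {p : List Nat} {x : Nat} (h : IsRoot p x) : root p x = x :=
  rootF_of_isRoot h _

lemma root_step {p : List Nat} (hw : Wf p) {x : Nat} (h : ¬ IsRoot p x) :
    root p x = root p (pstep p x) := by
  have hx : x < p.length := not_isRoot_lt h
  obtain ⟨m, hm⟩ : ∃ m, p.length = m + 1 := ⟨p.length - 1, by omega⟩
  have h1 : root p x = rootF m p (pstep p x) := by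
    unfold root; rw [hm, rootF_succ_of_not h]
  have hpx : pstep p x < p.length := hw.1 x hx
  have h2 : IsRoot p (rootF (p.length - 1) p (pstep p x)) :=
    reach_pigeon hw.1 hpx (hw.2 _)
  rw [show m = p.length - 1 from by omega] at h1
  rw [h1]; exact rootF_eq_root hw h2

lemma root_lt {p : List Nat} (hw : Wf p) {x : Nat} (hx : x < p.length) : root p x < p.length :=
  rootF_lt hw.1 hx _

-- pstep over set

lemma pstep_set_self {p : List Nat} {a : Nat} (h : a < p.length) (b : Nat) :
    pstep (p.set a b) a = b := by
  simp [pstep, List.getD, List.getElem?_set_self, h]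

lemma pstep_set_ne {p : List Nat} {x a : Nat} (h : x ≠ a) (b : Nat) :
    pstep (p.set a b) x = pstep p x := by
  simp [pstep, List.getD, List.getElem?_set_ne (by omega : a ≠ x)]

lemma rootF_congr {p q : List Nat} (hgd : ∀ z, pstep p z = pstep q z) :
    ∀ f x, rootF f p x = rootF f q x := by
  intro f
  induction f with
  | zero => intro x; rfl
  | succ f ih =>
    intro x
    rw [rootF_succ_def, rootF_succ_def, hgd x]
    by_cases hx : pstep q x = x
    · rw [if_pos hx, if_pos hx]
    · rw [if_neg hx, if_neg hx, ih]

lemma root_congr {p q : List Nat} (hlen : p.length = q.length)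
    (hgd : ∀ z, pstep p z = pstep q z) : ∀ x, root p x = root q x := by
  intro x; unfold root; rw [hlen]; exact rootF_congr hgd _ _

lemma wf_congr {p q : List Nat} (hlen : p.length = q.length)
    (hgd : ∀ z, pstep p z = pstep q z) (hw : Wf p) : Wf q := by
  constructor
  · intro x hx; rw [← hlen] at hx ⊢; rw [← hgd]; exact hw.1 x hx
  · intro x
    obtain ⟨k, hk⟩ := hw.2 x
    refine ⟨k, ?_⟩
    unfold IsRoot at *
    rw [← rootF_congr hgd, ← hgd]; exact hk


-- path compression: setting x's parent to its root changes no root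

lemma compress_spec {p : List Nat} (hw : Wf p) {x : Nat} (hx : x < p.length) :
    (∀ y, root (p.set x (root p x)) y = root p y) ∧ Wf (p.set x (root p x)) := by
  set r := root p x with hrdef
  set q := p.set x r with hqdef
  have hqlen : q.length = p.length := by simp [hqdef]
  by_cases hr : r = x
  · have hgd : ∀ z, pstep q z = pstep p z := by
      intro z
      by_cases hz : z = x
      · rw [hz, hqdef, pstep_set_self hx]
        have hxr : IsRoot p x := by
          have h0 := root_isRoot hw x
          rw [← hrdef, hr] at h0
          exact h0
        rw [hr]; exact hxr.symm
      · rw [hqdef, pstep_set_ne hz]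
    exact ⟨fun y => root_congr hqlen hgd y,
           wf_congr hqlen.symm (fun z => (hgd z).symm) hw⟩
  · have hnr : ¬ IsRoot p x := fun hroot => hr (root_of_isRoot hroot)
    have hrootr : IsRoot p r := root_isRoot hw x
    have hrlt : r < p.length := root_lt hw hx
    have hqin : ∀ z, z < q.length → pstep q z < q.length := by
      intro z hz
      by_cases hzx : z = x
      · rw [hzx, hqdef, pstep_set_self hx]; simp only [List.length_set]; exact hrlt
      · rw [hqdef, pstep_set_ne hzx, hqlen]
        rw [hqlen] at hz
        exact hw.1 z hz
    have c1 : IsRoot q r := by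
      unfold IsRoot
      rw [hqdef, pstep_set_ne hr]
      exact hrootr
    have hqstep_x : pstep q x = r := by rw [hqdef]; exact pstep_set_self hx _
    have key : ∀ k y, IsRoot p (rootF k p y) → root q y = root p y ∧ ∃ k', IsRoot q (rootF k' q y) := by
      intro k
      induction k with
      | zero =>
        intro y hy
        have hy' : IsRoot p y := hy
        have hyx : y ≠ x := fun h => hnr (h ▸ hy')
        have hqy : IsRoot q y := by unfold IsRoot; rw [hqdef, pstep_set_ne hyx]; exact hy'
        exact ⟨by rw [root_of_isRoot hqy, root_of_isRoot hy'], ⟨0, hqy⟩⟩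
      | succ k ih =>
        intro y hy
        by_cases hyr : IsRoot p y
        · have hyx : y ≠ x := fun h => hnr (h ▸ hyr)
          have hqy : IsRoot q y := by unfold IsRoot; rw [hqdef, pstep_set_ne hyx]; exact hyr
          exact ⟨by rw [root_of_isRoot hqy, root_of_isRoot hyr], ⟨0, hqy⟩⟩
        · rw [rootF_succ_of_not hyr] at hy
          by_cases hyx : y = x
          · subst hyx
            have hrx : r ≠ y := hr
            have hnq : ¬ IsRoot q y := by unfold IsRoot; rw [hqstep_x]; exact hrx
            have hylen : y < p.length := hx
            constructor
            · have h1 : root q y = rootF (q.length - 1) q (pstep q y) := by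
                obtain ⟨m, hm⟩ : ∃ m, q.length = m + 1 := ⟨q.length - 1, by omega⟩
                unfold root
                rw [hm, rootF_succ_of_not hnq]
                norm_num
              rw [h1, hqstep_x, rootF_of_isRoot c1, ← hrdef]
            · exact ⟨1, by rw [rootF_succ_of_not hnq, hqstep_x]; exact c1⟩
          · have hsq : pstep q y = pstep p y := by rw [hqdef, pstep_set_ne hyx]
            have hnq : ¬ IsRoot q y := by unfold IsRoot; rw [hsq]; exact hyr
            have hylen : y < p.length := not_isRoot_lt hyr
            have hpystep : pstep p y < p.length := hw.1 y hylen
            obtain ⟨ihroot, ⟨k', hk'⟩⟩ := ih (pstep p y) hy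
            have hreachq : IsRoot q (rootF (q.length - 1) q (pstep p y)) :=
              reach_pigeon hqin (by omega) ⟨k', hk'⟩
            constructor
            · have h1 : root q y = rootF (q.length - 1) q (pstep q y) := by
                obtain ⟨m, hm⟩ : ∃ m, q.length = m + 1 := ⟨q.length - 1, by omega⟩
                unfold root
                rw [hm, rootF_succ_of_not hnq]
                norm_num
              have h2 : rootF (q.length - 1) q (pstep p y) = root q (pstep p y) := by
                have hst := rootF_stable hreachq q.length (by omega)
                unfold root
                exact hst.symm
              rw [h1, hsq, h2, ihroot, ← root_step hw hyr]
            · refine ⟨(q.length - 1) + 1, ?_⟩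
              rw [rootF_succ_of_not hnq, hsq]
              exact hreachq
    have hwq : Wf q := by
      refine ⟨hqin, fun y => ?_⟩
      obtain ⟨k, hk⟩ := hw.2 y
      exact (key k y hk).2
    exact ⟨fun y => (key (Classical.choose (hw.2 y)) y (Classical.choose_spec (hw.2 y))).1, hwq⟩

-- linking one root under another: classes of rx and ry merge

lemma link_spec {p : List Nat} (hw : Wf p) {rx ry : Nat}
    (hrx : IsRoot p rx) (hry : IsRoot p ry) (hxlt : rx < p.length) (hylt : ry < p.length) :
    (∀ y, root (p.set rx ry) y = if root p y = rx then ry else root p y) ∧ Wf (p.set rx ry) := by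
  set q := p.set rx ry with hqdef
  have hqlen : q.length = p.length := by simp [hqdef]
  by_cases hxy : rx = ry
  · have hgd : ∀ z, pstep q z = pstep p z := by
      intro z
      by_cases hz : z = rx
      · rw [hz, hqdef, pstep_set_self hxlt, hxy]
        exact hry.symm
      · rw [hqdef, pstep_set_ne hz]
    refine ⟨fun y => ?_, wf_congr hqlen.symm (fun z => (hgd z).symm) hw⟩
    rw [root_congr hqlen hgd y]
    by_cases hc : root p y = rx
    · rw [if_pos hc, hc, hxy]
    · rw [if_neg hc]
  · have hqin : ∀ z, z < q.length → pstep q z < q.length := by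
      intro z hz
      by_cases hzx : z = rx
      · rw [hzx, hqdef, pstep_set_self hxlt]; simp only [List.length_set]; exact hylt
      · rw [hqdef, pstep_set_ne hzx, hqlen]
        rw [hqlen] at hz
        exact hw.1 z hz
    have hyx : ry ≠ rx := fun h => hxy h.symm
    have c1 : IsRoot q ry := by
      unfold IsRoot; rw [hqdef, pstep_set_ne hyx]; exact hry
    have hqstep_x : pstep q rx = ry := by rw [hqdef]; exact pstep_set_self hxlt _
    have key : ∀ k y, IsRoot p (rootF k p y) →
        (root q y = if root p y = rx then ry else root p y) ∧ ∃ k', IsRoot q (rootF k' q y) := by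
      intro k
      induction k with
      | zero =>
        intro y hy
        have hy' : IsRoot p y := hy
        by_cases hyrx : y = rx
        · subst hyrx
          have hnq : ¬ IsRoot q y := by unfold IsRoot; rw [hqstep_x]; exact hyx
          constructor
          · have h1 : root q y = rootF (q.length - 1) q (pstep q y) := by
              obtain ⟨m, hm⟩ : ∃ m, q.length = m + 1 := ⟨q.length - 1, by omega⟩
              unfold root
              rw [hm, rootF_succ_of_not hnq]
              norm_num
            rw [h1, hqstep_x, rootF_of_isRoot c1, root_of_isRoot hy', if_pos rfl]
          · exact ⟨1, by rw [rootF_succ_of_not hnq, hqstep_x]; exact c1⟩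
        · have hqy : IsRoot q y := by unfold IsRoot; rw [hqdef, pstep_set_ne hyrx]; exact hy'
          constructor
          · rw [root_of_isRoot hqy, root_of_isRoot hy', if_neg hyrx]
          · exact ⟨0, hqy⟩
      | succ k ih =>
        intro y hy
        by_cases hyr : IsRoot p y
        · by_cases hyrx : y = rx
          · subst hyrx
            have hnq : ¬ IsRoot q y := by unfold IsRoot; rw [hqstep_x]; exact hyx
            constructor
            · have h1 : root q y = rootF (q.length - 1) q (pstep q y) := by
                obtain ⟨m, hm⟩ : ∃ m, q.length = m + 1 := ⟨q.length - 1, by omega⟩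
                unfold root
                rw [hm, rootF_succ_of_not hnq]
                norm_num
              rw [h1, hqstep_x, rootF_of_isRoot c1, root_of_isRoot hyr, if_pos rfl]
            · exact ⟨1, by rw [rootF_succ_of_not hnq, hqstep_x]; exact c1⟩
          · have hqy : IsRoot q y := by unfold IsRoot; rw [hqdef, pstep_set_ne hyrx]; exact hyr
            constructor
            · rw [root_of_isRoot hqy, root_of_isRoot hyr, if_neg hyrx]
            · exact ⟨0, hqy⟩
        · rw [rootF_succ_of_not hyr] at hy
          have hyrx : y ≠ rx := fun h => hyr (h ▸ hrx)
          have hsq : pstep q y = pstep p y := by rw [hqdef, pstep_set_ne hyrx]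
          have hnq : ¬ IsRoot q y := by unfold IsRoot; rw [hsq]; exact hyr
          have hylen : y < p.length := not_isRoot_lt hyr
          have hpystep : pstep p y < p.length := hw.1 y hylen
          obtain ⟨ihroot, ⟨k', hk'⟩⟩ := ih (pstep p y) hy
          have hreachq : IsRoot q (rootF (q.length - 1) q (pstep p y)) :=
            reach_pigeon hqin (by omega) ⟨k', hk'⟩
          constructor
          · have h1 : root q y = rootF (q.length - 1) q (pstep q y) := by
              obtain ⟨m, hm⟩ : ∃ m, q.length = m + 1 := ⟨q.length - 1, by omega⟩
              unfold root
              rw [hm, rootF_succ_of_not hnq]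
              norm_num
            have h2 : rootF (q.length - 1) q (pstep p y) = root q (pstep p y) := by
              have hst := rootF_stable hreachq q.length (by omega)
              unfold root
              exact hst.symm
            rw [h1, hsq, h2, ihroot, ← root_step hw hyr]
          · refine ⟨(q.length - 1) + 1, ?_⟩
            rw [rootF_succ_of_not hnq, hsq]
            exact hreachq
    have hwq : Wf q := by
      refine ⟨hqin, fun y => ?_⟩
      obtain ⟨k, hk⟩ := hw.2 y
      exact (key k y hk).2
    exact ⟨fun y => (key (Classical.choose (hw.2 y)) y (Classical.choose_spec (hw.2 y))).1, hwq⟩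

lemma dsuFind_succ_def (f : Nat) (p : List Nat) (x : Nat) :
    dsuFind (f+1) p x = if pstep p x = x then (x, p)
      else ((dsuFind f p (pstep p x)).1, (dsuFind f p (pstep p x)).2.set x (dsuFind f p (pstep p x)).1) := rfl

-- find: returns the root, preserves all roots, preserves well-formedness

lemma find_spec : ∀ (f : Nat) (p : List Nat) (x : Nat), Wf p → IsRoot p (rootF f p x) →
    (dsuFind f p x).1 = root p x ∧ (dsuFind f p x).2.length = p.length ∧
    Wf (dsuFind f p x).2 ∧ ∀ y, root (dsuFind f p x).2 y = root p y := by
  intro f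
  induction f with
  | zero =>
    intro p x hw hroot
    have hr : IsRoot p x := hroot
    exact ⟨(root_of_isRoot hr).symm, rfl, hw, fun _ => rfl⟩
  | succ f ih =>
    intro p x hw hroot
    by_cases hr : pstep p x = x
    · rw [dsuFind_succ_def, if_pos hr]
      exact ⟨(root_of_isRoot hr).symm, rfl, hw, fun _ => rfl⟩
    · rw [dsuFind_succ_def, if_neg hr]
      rw [rootF_succ_of_not hr] at hroot
      obtain ⟨ih1, ih2, ih3, ih4⟩ := ih p (pstep p x) hw hroot
      have hx : x < p.length := not_isRoot_lt hr
      have hxq : x < (dsuFind f p (pstep p x)).2.length := by omega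
      have hval : (dsuFind f p (pstep p x)).1 = root (dsuFind f p (pstep p x)).2 x := by
        rw [ih1, ih4 x, root_step hw hr]
      obtain ⟨hcomp1, hcomp2⟩ := compress_spec ih3 hxq
      refine ⟨?_, ?_, ?_, ?_⟩
      · simp only [ih1]
        rw [← root_step hw hr]
      · simp only [List.length_set]; exact ih2
      · rw [hval]; exact hcomp2
      · intro y
        simp only []
        rw [hval]
        rw [hcomp1 y, ih4 y]

lemma isRoot_of_root_eq {q : List Nat} (hw : Wf q) {r : Nat} (h : root q r = r) :
    IsRoot q r := h ▸ root_isRoot hw r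

lemma root_root {p : List Nat} (hw : Wf p) (x : Nat) : root p (root p x) = root p x :=
  root_of_isRoot (root_isRoot hw x)

lemma union_spec {p : List Nat} (hw : Wf p) {x y : Nat}
    (hx : x < p.length) (hy : y < p.length) :
    (dsuUnion p.length p x y).length = p.length ∧ Wf (dsuUnion p.length p x y) ∧
    ∀ a, root (dsuUnion p.length p x y) a =
      if root p a = root p x then root p y else root p a := by
  have hf1 : IsRoot p (rootF p.length p y) := root_isRoot hw y
  obtain ⟨f1a, f1b, f1c, f1d⟩ := find_spec p.length p y hw hf1
  have hf2 : IsRoot (dsuFind p.length p y).2 (rootF p.length (dsuFind p.length p y).2 x) := by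
    have h0 := root_isRoot f1c x
    unfold root at h0
    rw [f1b] at h0
    exact h0
  obtain ⟨f2a, f2b, f2c, f2d⟩ := find_spec p.length (dsuFind p.length p y).2 x f1c hf2
  have hrxval : (dsuFind p.length (dsuFind p.length p y).2 x).1 = root p x := by
    rw [f2a, f1d]
  have hryval : (dsuFind p.length p y).1 = root p y := f1a
  have hq2root : ∀ a, root (dsuFind p.length (dsuFind p.length p y).2 x).2 a = root p a := by
    intro a; rw [f2d, f1d]
  have hq2len : (dsuFind p.length (dsuFind p.length p y).2 x).2.length = p.length := by
    rw [f2b, f1b]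
  have hrx_root : IsRoot (dsuFind p.length (dsuFind p.length p y).2 x).2 (root p x) :=
    isRoot_of_root_eq f2c (by rw [hq2root, root_root hw])
  have hry_root : IsRoot (dsuFind p.length (dsuFind p.length p y).2 x).2 (root p y) :=
    isRoot_of_root_eq f2c (by rw [hq2root, root_root hw])
  have hrxlt : root p x < (dsuFind p.length (dsuFind p.length p y).2 x).2.length := by
    rw [hq2len]; exact root_lt hw hx
  have hrylt : root p y < (dsuFind p.length (dsuFind p.length p y).2 x).2.length := by
    rw [hq2len]; exact root_lt hw hy
  obtain ⟨hl1, hl2⟩ := link_spec f2c hrx_root hry_root hrxlt hrylt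
  have hun : dsuUnion p.length p x y =
      (dsuFind p.length (dsuFind p.length p y).2 x).2.set (root p x) (root p y) := by
    show (dsuFind p.length (dsuFind p.length p y).2 x).2.set
        (dsuFind p.length (dsuFind p.length p y).2 x).1 (dsuFind p.length p y).1 = _
    rw [hrxval, hryval]
  refine ⟨?_, ?_, ?_⟩
  · rw [hun]; simp only [List.length_set]; exact hq2len
  · rw [hun]; exact hl2
  · intro a
    rw [hun, hl1 a, hq2root a]

-- closure utilities

lemma eqvGen_clos {r s : Nat → Nat → Prop} (h : ∀ u v, r u v → Relation.EqvGen s u v) :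
    ∀ a b, Relation.EqvGen r a b → Relation.EqvGen s a b := by
  intro a b hr
  induction hr with
  | rel u v huv => exact h u v huv
  | refl u => exact Relation.EqvGen.refl u
  | symm u v _ ih => exact Relation.EqvGen.symm _ _ ih
  | trans u v w _ _ ih1 ih2 => exact Relation.EqvGen.trans _ _ _ ih1 ih2

-- the effect of a fold of unions on the root partition

lemma fold_spec (n : Nat) (es : List (Nat × Nat)) : ∀ (p : List Nat), p.length = n → Wf p →
    (∀ e ∈ es, e.1 < n ∧ e.2 < n) →
    (es.foldl (fun p e => dsuUnion n p e.1 e.2) p).length = n ∧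
    Wf (es.foldl (fun p e => dsuUnion n p e.1 e.2) p) ∧
    ∀ a b, (root (es.foldl (fun p e => dsuUnion n p e.1 e.2) p) a =
            root (es.foldl (fun p e => dsuUnion n p e.1 e.2) p) b ↔
      Relation.EqvGen (fun u v => (u, v) ∈ es ∨ root p u = root p v) a b) := by
  induction es with
  | nil =>
    intro p hlen hw _
    refine ⟨hlen, hw, fun a b => ⟨fun h => Relation.EqvGen.rel a b (Or.inr h), fun h => ?_⟩⟩
    induction h with
    | rel u v huv =>
      rcases huv with h | h
      · simp at h
      · exact h
    | refl u => rfl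
    | symm u v _ ih => exact ih.symm
    | trans u v w _ _ ih1 ih2 => exact ih1.trans ih2
  | cons e es ih =>
    intro p hlen hw hb
    have he1 : e.1 < p.length := by rw [hlen]; exact (hb e (List.mem_cons_self)).1
    have he2 : e.2 < p.length := by rw [hlen]; exact (hb e (List.mem_cons_self)).2
    obtain ⟨hu1, hu2, hu3⟩ := union_spec hw he1 he2
    have hfoldeq : (e :: es).foldl (fun p e => dsuUnion n p e.1 e.2) p =
        es.foldl (fun p e => dsuUnion n p e.1 e.2) (dsuUnion n p e.1 e.2) := rfl
    rw [hlen] at hu1 hu2 hu3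
    obtain ⟨ih1, ih2, ih3⟩ := ih (dsuUnion n p e.1 e.2) hu1 hu2
      (fun e' he' => hb e' (List.mem_cons_of_mem _ he'))
    rw [hfoldeq]
    refine ⟨ih1, ih2, fun a b => (ih3 a b).trans ⟨?_, ?_⟩⟩
    · -- from closure over (es, p1-roots) to closure over (e :: es, p-roots)
      apply eqvGen_clos
      intro u v huv
      rcases huv with hmem | hroot
      · exact Relation.EqvGen.rel u v (Or.inl (List.mem_cons_of_mem _ hmem))
      · -- root p1 u = root p1 v
        rw [hu3 u, hu3 v] at hroot
        by_cases hcu : root p u = root p e.1 <;> by_cases hcv : root p v = root p e.1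
        · -- both mapped to root p e.2 : u ~ e.1 ~ v
          refine Relation.EqvGen.trans u e.1 v (Relation.EqvGen.rel _ _ (Or.inr hcu)) ?_
          exact Relation.EqvGen.symm _ _ (Relation.EqvGen.rel _ _ (Or.inr hcv))
        · rw [if_pos hcu, if_neg hcv] at hroot
          -- root p e.2 = root p v : u ~ e.1 ~ e.2 ~ v
          refine Relation.EqvGen.trans u e.1 v (Relation.EqvGen.rel _ _ (Or.inr hcu)) ?_
          refine Relation.EqvGen.trans e.1 e.2 v (Relation.EqvGen.rel _ _ (Or.inl ?_)) ?_
          · exact List.mem_cons_self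
          · exact Relation.EqvGen.rel _ _ (Or.inr hroot)
        · rw [if_neg hcu, if_pos hcv] at hroot
          refine Relation.EqvGen.trans u e.2 v (Relation.EqvGen.rel _ _ (Or.inr hroot)) ?_
          refine Relation.EqvGen.symm _ _ ?_
          refine Relation.EqvGen.trans v e.1 e.2 (Relation.EqvGen.rel _ _ (Or.inr hcv)) ?_
          exact Relation.EqvGen.rel _ _ (Or.inl List.mem_cons_self)
        · rw [if_neg hcu, if_neg hcv] at hroot
          exact Relation.EqvGen.rel _ _ (Or.inr hroot)
    · apply eqvGen_clos
      intro u v huv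
      rcases huv with hmem | hroot
      · rcases List.mem_cons.mp hmem with heq | hmem'
        · -- the new edge: now both map to root p e.2
          have : root (dsuUnion n p e.1 e.2) u = root (dsuUnion n p e.1 e.2) v := by
            have hv : v = e.2 := by rw [← heq]
            have hu' : u = e.1 := by rw [← heq]
            rw [hu', hv, hu3, hu3, if_pos rfl]
            by_cases hc : root p e.2 = root p e.1
            · rw [if_pos hc, hc]
            · rw [if_neg hc]
          exact Relation.EqvGen.rel _ _ (Or.inr this)
        · exact Relation.EqvGen.rel _ _ (Or.inl hmem')
      · have : root (dsuUnion n p e.1 e.2) u = root (dsuUnion n p e.1 e.2) v := by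
          rw [hu3, hu3, hroot]
        exact Relation.EqvGen.rel _ _ (Or.inr this)

lemma mem_divLoop (v d q : Nat) (acc : List Nat) : q ∈ divLoop v d acc ↔
    q ∈ acc ∨ ∃ e, d ≤ e ∧ e * e ≤ v ∧ e ∣ v ∧ (q = e ∨ q = v / e) := by
  fun_induction divLoop v d acc with
  | case1 d acc h ih =>
    simp only [dite_eq_ite] at ih
    rw [ih]
    constructor
    · rintro (hacc | ⟨e, he1, he2, he3, he4⟩)
      · rcases List.mem_append.mp hacc with hacc | hfirst
        · exact Or.inl hacc
        · by_cases hm : v % d = 0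
          · rw [if_pos hm] at hfirst
            simp only [List.mem_cons, List.not_mem_nil, or_false] at hfirst
            exact Or.inr ⟨d, le_rfl, h, Nat.dvd_of_mod_eq_zero hm, hfirst⟩
          · rw [if_neg hm] at hfirst; simp at hfirst
      · exact Or.inr ⟨e, by omega, he2, he3, he4⟩
    · rintro (hacc | ⟨e, he1, he2, he3, he4⟩)
      · exact Or.inl (List.mem_append_left _ hacc)
      · by_cases hed : e = d
        · subst hed
          have hm : v % e = 0 := Nat.dvd_iff_mod_eq_zero.mp he3
          left
          apply List.mem_append_right
          rw [if_pos hm]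
          simp only [List.mem_cons, List.not_mem_nil, or_false]
          exact he4
        · exact Or.inr ⟨e, by omega, he2, he3, he4⟩
  | case2 d acc h =>
    constructor
    · exact Or.inl
    · rintro (hacc | ⟨e, he1, he2, he3, he4⟩)
      · exact hacc
      · exfalso
        have : d * d ≤ e * e := Nat.mul_le_mul he1 he1
        omega

lemma mem_divisorsOf {v : Nat} (hv : 1 ≤ v) (q : Nat) :
    q ∈ divisorsOf v ↔ q ∣ v ∧ 2 ≤ q := by
  unfold divisorsOf
  rw [List.mem_append, mem_divLoop]
  constructor
  · rintro ((hacc | ⟨e, he1, he2, he3, he4⟩) | htail)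
    · cases hacc
    · have he0 : 0 < e := by omega
      rcases he4 with rfl | rfl
      · exact ⟨he3, he1⟩
      · refine ⟨Nat.div_dvd_of_dvd he3, ?_⟩
        have : e ≤ v / e := (Nat.le_div_iff_mul_le he0).mpr he2
        omega
    · by_cases h1 : 1 < v
      · rw [if_pos h1] at htail
        simp only [List.mem_cons, List.not_mem_nil, or_false] at htail
        subst htail
        exact ⟨dvd_rfl, h1⟩
      · rw [if_neg h1] at htail; simp at htail
  · rintro ⟨hdvd, h2⟩
    have hv0 : v ≠ 0 := by omega
    have hqv : q ≤ v := Nat.le_of_dvd (by omega) hdvd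
    by_cases hsq : q * q ≤ v
    · exact Or.inl (Or.inr ⟨q, h2, hsq, hdvd, Or.inl rfl⟩)
    · have heq : v / q * q = v := Nat.div_mul_cancel hdvd
      by_cases he1 : v / q ≤ 1
      · have hne : v / q = 1 := by
          rcases Nat.eq_zero_or_pos (v / q) with h0 | h0
          · rw [h0] at heq; omega
          · omega
        have hveq : v = q := by rw [hne] at heq; omega
        right
        rw [if_pos (by omega : 1 < v)]
        simp only [List.mem_cons, List.not_mem_nil, or_false]
        omega
      · left
        refine Or.inr ⟨v / q, by omega, ?_, ⟨q, heq.symm⟩, Or.inr ?_⟩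
        · have helt : v / q < q := by
            by_contra hge
            have h2' : q * q ≤ (v / q) * q := Nat.mul_le_mul_right q (by omega)
            omega
          have h3 : (v / q) * (v / q) ≤ (v / q) * q := Nat.mul_le_mul_left _ (by omega)
          omega
        · rw [Nat.div_div_self hdvd hv0]

-- ports (copies for scratch development)

def innerP (i : Nat) : List Nat → PySem.Dict Nat Nat → PySem.Dict Nat Nat × List (Nat × Nat)
  | [], ow => (ow, [])
  | d :: ds, ow =>
    match ow.get? d with
    | none => innerP i ds (ow.insert d i)
    | some j =>
      let r := innerP i ds ow
      (r.1, (i, j) :: r.2)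

def buildP : List Int → Nat → PySem.Dict Nat Nat → Option Nat → List Nat →
    (List (Nat × Nat) × PySem.Dict Nat Nat × Option Nat × List Nat)
  | [], _, ow, z, big => ([], ow, z, big)
  | v :: rest, i, ow, z, big =>
    if v = 0 then
      match z with
      | none => buildP rest (i+1) ow (some i) big
      | some zi =>
        let r := buildP rest (i+1) ow (some zi) big
        ((i, zi) :: r.1, r.2)
    else
      let big' := if 2 ≤ v.natAbs then big ++ [i] else big
      let ir := innerP i (divisorsOf v.natAbs) ow
      let r := buildP rest (i+1) ir.1 z big'
      (ir.2 ++ r.1, r.2)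

lemma inner_decomp (n i : Nat) : ∀ (ds : List Nat) (ow : PySem.Dict Nat Nat) (p : List Nat),
    (ds.foldl (fun (st : List Nat × PySem.Dict Nat Nat) d =>
        match st.2.get? d with
        | none => (st.1, st.2.insert d i)
        | some j => (dsuUnion n st.1 i j, st.2)) (p, ow)) =
    ((innerP i ds ow).2.foldl (fun p e => dsuUnion n p e.1 e.2) p, (innerP i ds ow).1) := by
  intro ds
  induction ds with
  | nil => intro ow p; rfl
  | cons d ds ih =>
    intro ow p
    cases hget : ow.get? d with
    | none =>
      simp only [List.foldl_cons, innerP, hget]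
      exact ih (ow.insert d i) p
    | some j =>
      simp only [List.foldl_cons, innerP, hget]
      exact ih ow (dsuUnion n p i j)

lemma build_decomp (n : Nat) : ∀ (vs : List Int) (i : Nat) (p : List Nat)
    (ow : PySem.Dict Nat Nat) (z : Option Nat) (big : List Nat),
    buildB n vs i p ow z big =
      ((buildP vs i ow z big).1.foldl (fun p e => dsuUnion n p e.1 e.2) p,
       (buildP vs i ow z big).2.1, (buildP vs i ow z big).2.2.1, (buildP vs i ow z big).2.2.2) := by
  intro vs
  induction vs with
  | nil => intro i p ow z big; rfl
  | cons v rest ih =>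
    intro i p ow z big
    by_cases hv : v = 0
    · cases z with
      | none =>
        simp only [buildB, buildP, if_pos hv]
        exact ih (i+1) p ow (some i) big
      | some zi =>
        simp only [buildB, buildP, if_pos hv]
        rw [ih (i+1) (dsuUnion n p i zi) ow (some zi) big]
        rfl
    · simp only [buildB, buildP, if_neg hv]
      rw [inner_decomp n i (divisorsOf v.natAbs) ow p]
      rw [ih (i+1) _ (innerP i (divisorsOf v.natAbs) ow).1 z _]
      simp only [List.foldl_append]

-- ===== innerP invariants =====

lemma innerP_mono (i : Nat) : ∀ (ds : List Nat) (ow : PySem.Dict Nat Nat) (d j : Nat),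
    ow.get? d = some j → (innerP i ds ow).1.get? d = some j := by
  intro ds
  induction ds with
  | nil => intro ow d j hj; exact hj
  | cons d' ds ih =>
    intro ow d j hj
    cases hget : ow.get? d' with
    | none =>
      simp only [innerP, hget]
      apply ih
      have hne : d ≠ d' := fun h => by rw [h, hget] at hj; cases hj
      rw [PySem.Dict.get?_insert_of_ne ow i hne]
      exact hj
    | some j' =>
      simp only [innerP, hget]
      exact ih ow d j hj

lemma innerP_entry (i : Nat) : ∀ (ds : List Nat) (ow : PySem.Dict Nat Nat) (d j : Nat),
    (innerP i ds ow).1.get? d = some j → ow.get? d = some j ∨ (j = i ∧ d ∈ ds) := by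
  intro ds
  induction ds with
  | nil => intro ow d j hj; exact Or.inl hj
  | cons d' ds ih =>
    intro ow d j hj
    cases hget : ow.get? d' with
    | none =>
      simp only [innerP, hget] at hj
      rcases ih _ d j hj with hin | ⟨rfl, hmem⟩
      · by_cases hdd : d = d'
        · subst hdd
          rw [PySem.Dict.get?_insert_self] at hin
          exact Or.inr ⟨(Option.some.inj hin).symm, List.mem_cons_self⟩
        · rw [PySem.Dict.get?_insert_of_ne ow i hdd] at hin
          exact Or.inl hin
      · exact Or.inr ⟨rfl, List.mem_cons_of_mem _ hmem⟩
    | some j' =>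
      simp only [innerP, hget] at hj
      rcases ih ow d j hj with hin | ⟨rfl, hmem⟩
      · exact Or.inl hin
      · exact Or.inr ⟨rfl, List.mem_cons_of_mem _ hmem⟩

lemma innerP_edge (i : Nat) : ∀ (ds : List Nat) (ow : PySem.Dict Nat Nat) (e : Nat × Nat),
    e ∈ (innerP i ds ow).2 → e.1 = i ∧ (e.2 = i ∨ ∃ d ∈ ds, ow.get? d = some e.2) := by
  intro ds
  induction ds with
  | nil => intro ow e he; simp [innerP] at he
  | cons d' ds ih =>
    intro ow e he
    cases hget : ow.get? d' with
    | none =>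
      simp only [innerP, hget] at he
      obtain ⟨h1, h2⟩ := ih _ e he
      refine ⟨h1, ?_⟩
      rcases h2 with h2 | ⟨d, hd, hd2⟩
      · exact Or.inl h2
      · by_cases hdd : d = d'
        · subst hdd
          rw [PySem.Dict.get?_insert_self] at hd2
          exact Or.inl (Option.some.inj hd2).symm
        · rw [PySem.Dict.get?_insert_of_ne ow i hdd] at hd2
          exact Or.inr ⟨d, List.mem_cons_of_mem _ hd, hd2⟩
    | some j' =>
      simp only [innerP, hget] at he
      rcases List.mem_cons.mp he with rfl | he'
      · exact ⟨rfl, Or.inr ⟨d', List.mem_cons_self, hget⟩⟩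
      · obtain ⟨h1, h2⟩ := ih ow e he'
        refine ⟨h1, ?_⟩
        rcases h2 with h2 | ⟨d, hd, hd2⟩
        · exact Or.inl h2
        · exact Or.inr ⟨d, List.mem_cons_of_mem _ hd, hd2⟩

lemma innerP_cover (i : Nat) : ∀ (ds : List Nat) (ow : PySem.Dict Nat Nat) (d : Nat),
    d ∈ ds → ∃ j, (innerP i ds ow).1.get? d = some j ∧
      ((i, j) ∈ (innerP i ds ow).2 ∨ j = i) := by
  intro ds
  induction ds with
  | nil => intro ow d hd; simp at hd
  | cons d' ds ih =>
    intro ow d hd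
    cases hget : ow.get? d' with
    | none =>
      simp only [innerP, hget]
      rcases List.mem_cons.mp hd with rfl | hd'
      · refine ⟨i, ?_, Or.inr rfl⟩
        exact innerP_mono i ds _ d i (PySem.Dict.get?_insert_self ow d i)
      · exact ih _ d hd'
    | some j' =>
      simp only [innerP, hget]
      rcases List.mem_cons.mp hd with rfl | hd'
      · exact ⟨j', innerP_mono i ds ow d j' hget, Or.inl (List.mem_cons_self)⟩
      · obtain ⟨j, hj1, hj2⟩ := ih ow d hd'
        refine ⟨j, hj1, ?_⟩
        rcases hj2 with hj2 | hj2
        · exact Or.inl (List.mem_cons_of_mem _ hj2)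
        · exact Or.inr hj2

lemma drop_cons_head {h : List Int} {k : Nat} {v : Int} {rest : List Int}
    (hd : h.drop k = v :: rest) : k < h.length ∧ h.getD k 0 = v ∧ h.drop (k+1) = rest := by
  have hk : k < h.length := by
    by_contra hk
    rw [List.drop_eq_nil_of_le (by omega)] at hd
    cases hd
  have h0 : h[k]? = some v := by
    have h1 : (h.drop k)[0]? = h[k + 0]? := List.getElem?_drop
    rw [hd] at h1
    simpa using h1.symm
  refine ⟨hk, by simp [List.getD, h0], ?_⟩
  have : h.drop (k + 1) = (h.drop k).drop 1 := by rw [List.drop_drop]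
  rw [this, hd]
  rfl

-- OwOk: every owner entry is a valid earlier index sharing the divisor

def OwOk (h : List Int) (ow : PySem.Dict Nat Nat) : Prop :=
  ∀ d j, ow.get? d = some j → j < h.length ∧ 2 ≤ d ∧
    (d ∣ (h.getD j 0).natAbs) ∧ h.getD j 0 ≠ 0

def ZOk (h : List Int) (z : Option Nat) : Prop :=
  ∀ zi, z = some zi → zi < h.length ∧ h.getD zi 0 = 0

def BigOk (h : List Int) (big : List Nat) : Prop :=
  ∀ b ∈ big, b < h.length ∧ 2 ≤ (h.getD b 0).natAbs

lemma gcd_ne_one_of_common {a b : Int} {d : Nat} (h2 : 2 ≤ d)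
    (hda : d ∣ a.natAbs) (hdb : d ∣ b.natAbs) : Int.gcd a b ≠ 1 := by
  intro hg
  have : d ∣ Nat.gcd a.natAbs b.natAbs := Nat.dvd_gcd hda hdb
  rw [Int.gcd] at hg
  rw [hg] at this
  have := Nat.le_of_dvd (by omega) this
  omega

lemma buildP_sound (h : List Int) : ∀ (vs : List Int) (k : Nat) (ow : PySem.Dict Nat Nat)
    (z : Option Nat) (big : List Nat),
    vs = h.drop k → OwOk h ow → ZOk h z → BigOk h big →
    (∀ e ∈ (buildP vs k ow z big).1, e.1 < h.length ∧ e.2 < h.length ∧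
        Int.gcd (h.getD e.1 0) (h.getD e.2 0) ≠ 1) ∧
    OwOk h (buildP vs k ow z big).2.1 ∧
    ZOk h (buildP vs k ow z big).2.2.1 ∧
    BigOk h (buildP vs k ow z big).2.2.2 := by
  intro vs
  induction vs with
  | nil =>
    intro k ow z big _ how hz hbig
    exact ⟨fun e he => by simp [buildP] at he, how, hz, hbig⟩
  | cons v rest ih =>
    intro k ow z big hd how hz hbig
    obtain ⟨hk, hkv, hrest⟩ := drop_cons_head hd.symm
    by_cases hv : v = 0
    · subst hv
      cases hzc : z with
      | none =>
        simp only [buildP, if_pos rfl]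
        refine ih (k+1) ow (some k) big hrest.symm how ?_ hbig
        intro zi hzi
        cases hzi
        exact ⟨hk, hkv⟩
      | some zi =>
        simp only [buildP, if_pos rfl]
        obtain ⟨hzi1, hzi2⟩ := hz zi hzc
        obtain ⟨e1, e2, e3, e4⟩ := ih (k+1) ow (some zi) big hrest.symm how
          (fun zi' hzi' => hz zi' (by rw [hzc]; exact hzi')) hbig
        refine ⟨fun e he => ?_, e2, e3, e4⟩
        rcases List.mem_cons.mp he with rfl | he'
        · refine ⟨hk, by omega, ?_⟩
          simp only [hkv, hzi2]
          decide
        · exact e1 e he'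
    · simp only [buildP, if_neg hv]
      have hnab : 1 ≤ v.natAbs := by
        rcases Nat.eq_zero_or_pos v.natAbs with h0 | h0
        · exact absurd (Int.natAbs_eq_zero.mp h0) hv
        · omega
      have hdsmem : ∀ d ∈ divisorsOf v.natAbs, d ∣ v.natAbs ∧ 2 ≤ d :=
        fun d hdm => (mem_divisorsOf hnab d).mp hdm
      have how' : OwOk h (innerP k (divisorsOf v.natAbs) ow).1 := by
        intro d j hj
        rcases innerP_entry k _ ow d j hj with hin | ⟨rfl, hdm⟩
        · exact how d j hin
        · obtain ⟨hdvd, h2d⟩ := hdsmem d hdm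
          exact ⟨hk, h2d, by rw [hkv]; exact hdvd, by rw [hkv]; exact hv⟩
      have hbig' : BigOk h (if 2 ≤ v.natAbs then big ++ [k] else big) := by
        by_cases hb : 2 ≤ v.natAbs
        · rw [if_pos hb]
          intro b hb'
          rcases List.mem_append.mp hb' with hb' | hb'
          · exact hbig b hb'
          · simp only [List.mem_cons, List.not_mem_nil, or_false] at hb'
            subst hb'
            exact ⟨hk, by rw [hkv]; exact hb⟩
        · rw [if_neg hb]; exact hbig
      obtain ⟨e1, e2, e3, e4⟩ := ih (k+1) (innerP k (divisorsOf v.natAbs) ow).1 z _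
        hrest.symm how' hz hbig'
      refine ⟨fun e he => ?_, e2, e3, e4⟩
      rcases List.mem_append.mp he with he' | he'
      · obtain ⟨hfst, hsnd⟩ := innerP_edge k _ ow e he'
        rcases hsnd with hsnd | ⟨d, hdm, hdj⟩
        · have hb2 : 2 ≤ v.natAbs := by
            by_contra hb2
            have hone : v.natAbs = 1 := by omega
            have hnil : divisorsOf v.natAbs = [] := by
              rw [hone]
              apply List.eq_nil_iff_forall_not_mem.mpr
              intro q hq
              obtain ⟨hdvd, h2⟩ := (mem_divisorsOf (by omega) q).mp hq
              have := Nat.le_of_dvd (by omega) hdvd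
              omega
            rw [hnil] at he'
            simp [innerP] at he'
          refine ⟨by rw [hfst]; exact hk, by rw [hsnd]; exact hk, ?_⟩
          rw [hfst, hsnd, hkv]
          exact gcd_ne_one_of_common hb2 dvd_rfl dvd_rfl
        · obtain ⟨hj1, hj2, hj3, hj4⟩ := how d e.2 hdj
          obtain ⟨hdvd, h2d⟩ := hdsmem d hdm
          refine ⟨by rw [hfst]; exact hk, hj1, ?_⟩
          rw [hfst, hkv]
          exact gcd_ne_one_of_common h2d hdvd hj3
      · exact e1 e he'

-- completeness of the build relative to any equivalence covering its edges

lemma buildP_complete (h : List Int) (R : Nat → Nat → Prop)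
    (hrefl : ∀ a, R a a) (hsymm : ∀ a b, R a b → R b a) (htrans : ∀ a b c, R a b → R b c → R a c) :
    ∀ (vs : List Int) (k : Nat) (ow : PySem.Dict Nat Nat) (z : Option Nat) (big : List Nat),
    vs = h.drop k →
    (∀ e ∈ (buildP vs k ow z big).1, R e.1 e.2) →
    (∀ i, i < k → h.getD i 0 ≠ 0 → ∀ d, 2 ≤ d → d ∣ (h.getD i 0).natAbs →
        ∃ j, ow.get? d = some j ∧ R i j) →
    (∀ i, i < k → h.getD i 0 = 0 → ∃ zi, z = some zi ∧ R i zi) →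
    (∀ b, b < k → 2 ≤ (h.getD b 0).natAbs → b ∈ big) →
    (∀ i, i < h.length → h.getD i 0 ≠ 0 → ∀ d, 2 ≤ d → d ∣ (h.getD i 0).natAbs →
        ∃ j, (buildP vs k ow z big).2.1.get? d = some j ∧ R i j) ∧
    (∀ i, i < h.length → h.getD i 0 = 0 → ∃ zi, (buildP vs k ow z big).2.2.1 = some zi ∧ R i zi) ∧
    (∀ b, b < h.length → 2 ≤ (h.getD b 0).natAbs → b ∈ (buildP vs k ow z big).2.2.2) := by
  intro vs
  induction vs with
  | nil =>
    intro k ow z big hd hedges howc hzc hbigc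
    have hk : h.length ≤ k := by
      by_contra hk
      have : h.drop k ≠ [] := by
        intro hnil
        have := List.length_drop (l := h) (i := k) ▸ congrArg List.length hnil
        simp at this
        omega
      exact this hd.symm
    exact ⟨fun i hi => howc i (by omega) , fun i hi => hzc i (by omega), fun b hb => hbigc b (by omega)⟩
  | cons v rest ih =>
    intro k ow z big hd hedges howc hzc hbigc
    obtain ⟨hk, hkv, hrest⟩ := drop_cons_head hd.symm
    by_cases hv : v = 0
    · subst hv
      cases z with
      | none =>
        simp only [buildP, reduceIte] at hedges ⊢
        have howc' : ∀ i, i < k+1 → h.getD i 0 ≠ 0 → ∀ d, 2 ≤ d → d ∣ (h.getD i 0).natAbs →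
            ∃ j, ow.get? d = some j ∧ R i j := by
          intro i hi hi0 d h2d hdvd
          rcases Nat.lt_or_ge i k with hik | hik
          · exact howc i hik hi0 d h2d hdvd
          · exfalso
            have hik' : i = k := by omega
            subst hik'
            rw [hkv] at hi0
            exact hi0 rfl
        refine ih (k+1) ow (some k) big hrest.symm hedges howc' ?_ ?_
        · intro i hi hz0
          rcases Nat.lt_or_ge i k with hik | hik
          · obtain ⟨zi, hzi, _⟩ := hzc i hik hz0
            cases hzi
          · have : k = i := by omega
            subst this
            exact ⟨_, rfl, hrefl _⟩
        · intro b hb hb2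
          rcases Nat.lt_or_ge b k with hbk | hbk
          · exact hbigc b hbk hb2
          · have : k = b := by omega
            subst this
            rw [hkv] at hb2
            simp at hb2
      | some zi =>
        simp only [buildP, reduceIte] at hedges ⊢
        have hRkzi : R k zi := hedges (k, zi) List.mem_cons_self
        have howc' : ∀ i, i < k+1 → h.getD i 0 ≠ 0 → ∀ d, 2 ≤ d → d ∣ (h.getD i 0).natAbs →
            ∃ j, ow.get? d = some j ∧ R i j := by
          intro i hi hi0 d h2d hdvd
          rcases Nat.lt_or_ge i k with hik | hik
          · exact howc i hik hi0 d h2d hdvd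
          · exfalso
            have hik' : i = k := by omega
            subst hik'
            rw [hkv] at hi0
            exact hi0 rfl
        refine ih (k+1) ow (some zi) big hrest.symm
          (fun e he => hedges e (List.mem_cons_of_mem _ he)) howc' ?_ ?_
        · intro i hi hz0
          rcases Nat.lt_or_ge i k with hik | hik
          · exact hzc i hik hz0
          · have : k = i := by omega
            subst this
            exact ⟨zi, rfl, hRkzi⟩
        · intro b hb hb2
          rcases Nat.lt_or_ge b k with hbk | hbk
          · exact hbigc b hbk hb2
          · have : k = b := by omega
            subst this
            rw [hkv] at hb2
            simp at hb2
    · simp only [buildP, if_neg hv] at hedges ⊢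
      have hnab : 1 ≤ v.natAbs := by
        rcases Nat.eq_zero_or_pos v.natAbs with h0 | h0
        · exact absurd (Int.natAbs_eq_zero.mp h0) hv
        · omega
      have hedges_inner : ∀ e ∈ (innerP k (divisorsOf v.natAbs) ow).2, R e.1 e.2 :=
        fun e he => hedges e (List.mem_append_left _ he)
      have hedges_rest := fun e he => hedges e (List.mem_append_right _ he)
      refine ih (k+1) (innerP k (divisorsOf v.natAbs) ow).1 z _ hrest.symm hedges_rest ?_ ?_ ?_
      · intro i hi hi0 d h2d hdvd
        rcases Nat.lt_or_ge i k with hik | hik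
        · obtain ⟨j, hj1, hj2⟩ := howc i hik hi0 d h2d hdvd
          exact ⟨j, innerP_mono k _ ow d j hj1, hj2⟩
        · have : k = i := by omega
          subst this
          rw [hkv] at hdvd
          have hdm : d ∈ divisorsOf v.natAbs := (mem_divisorsOf hnab d).mpr ⟨hdvd, h2d⟩
          obtain ⟨j, hj1, hj2⟩ := innerP_cover k _ ow d hdm
          refine ⟨j, hj1, ?_⟩
          rcases hj2 with hj2 | rfl
          · exact hedges_inner _ hj2
          · exact hrefl _
      · intro i hi hi0
        rcases Nat.lt_or_ge i k with hik | hik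
        · exact hzc i hik hi0
        · have : k = i := by omega
          subst this
          rw [hkv] at hi0
          exact absurd hi0 hv
      · intro b hb hb2
        rcases Nat.lt_or_ge b k with hbk | hbk
        · have := hbigc b hbk hb2
          by_cases hc : 2 ≤ v.natAbs
          · rw [if_pos hc]; exact List.mem_append_left _ this
          · rw [if_neg hc]; exact this
        · have : k = b := by omega
          subst this
          rw [hkv] at hb2
          rw [if_pos hb2]
          exact List.mem_append_right _ List.mem_cons_self

-- ===== initial state =====

lemma pstep_range (n x : Nat) : pstep (List.range n) x = x := by
  by_cases hx : x < n
  · simp [pstep, List.getD, List.getElem?_range, hx]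
  · exact pstep_of_le _ _ (by simpa using hx)

lemma wf_range (n : Nat) : Wf (List.range n) := by
  refine ⟨fun x hx => ?_, fun x => ⟨0, ?_⟩⟩
  · rw [pstep_range]; simpa using hx
  · show IsRoot _ x
    unfold IsRoot
    rw [pstep_range]

lemma root_range (n x : Nat) : root (List.range n) x = x :=
  root_of_isRoot (by unfold IsRoot; rw [pstep_range])

lemma eqvGen_or_eq (r : Nat → Nat → Prop) (a b : Nat) :
    Relation.EqvGen (fun u v => r u v ∨ u = v) a b ↔ Relation.EqvGen r a b := by
  constructor
  · apply eqvGen_clos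
    intro u v huv
    rcases huv with huv | rfl
    · exact Relation.EqvGen.rel _ _ huv
    · exact Relation.EqvGen.refl u
  · apply eqvGen_clos
    intro u v huv
    exact Relation.EqvGen.rel _ _ (Or.inl huv)

-- ===== A's nested loop as a fold over an edge list =====

def pairsA (n : Nat) : List (Nat × Nat) :=
  (List.range n).flatMap (fun i => (List.range' (i+1) (n - (i+1))).map (fun j => (i, j)))

lemma mem_pairsA (n : Nat) (e : Nat × Nat) :
    e ∈ pairsA n ↔ e.1 < e.2 ∧ e.2 < n := by
  unfold pairsA
  rw [List.mem_flatMap]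
  constructor
  · rintro ⟨i, hi, hmem⟩
    rw [List.mem_map] at hmem
    obtain ⟨j, hj, rfl⟩ := hmem
    rw [List.mem_range'_1] at hj
    rw [List.mem_range] at hi
    exact ⟨by omega, by omega⟩
  · rintro ⟨h1, h2⟩
    refine ⟨e.1, by rw [List.mem_range]; omega, ?_⟩
    rw [List.mem_map]
    exact ⟨e.2, by rw [List.mem_range'_1]; omega, rfl⟩

lemma foldl_if_filter (c : Nat × Nat → Bool) (u : List Nat → Nat × Nat → List Nat) :
    ∀ (es : List (Nat × Nat)) (p : List Nat),
    es.foldl (fun p e => if c e then u p e else p) p = (es.filter c).foldl u p := by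
  intro es
  induction es with
  | nil => intro p; rfl
  | cons e es ih =>
    intro p
    by_cases hc : c e
    · simp only [List.foldl_cons, List.filter_cons, hc, if_pos]
      rw [ih]
    · simp only [List.foldl_cons, List.filter_cons, hc, if_neg]
      simp only [Bool.false_eq_true, if_false]
      rw [ih]

-- scratch copies of the check loops / firstDict

lemma firstDict_get? : ∀ (xs : List Int) (i : Nat) (d : PySem.Dict Int Nat) (v : Int),
    (firstDict xs i d).get? v = (d.get? v).or ((PySem.List.index? xs v).map (· + i)) := by
  intro xs
  induction xs with
  | nil =>
    intro i d v
    simp [firstDict, PySem.List.index?_eq_idxOf?]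
  | cons x xs ih =>
    intro i d v
    by_cases hc : d.contains x
    · simp only [firstDict, hc, if_pos]
      rw [ih]
      cases hget : d.get? v with
      | some w => simp
      | none =>
        simp only [Option.none_or]
        by_cases hvx : v = x
        · subst hvx
          rw [PySem.Dict.contains_eq_isSome_get?, hget] at hc
          simp at hc
        · rw [PySem.List.index?_cons_of_ne xs (fun h => hvx h.symm)]
          rw [Option.map_map]
          congr 1
          funext a
          simp
          omega
    · simp only [firstDict, hc, if_neg, Bool.false_eq_true, if_false]
      rw [ih]
      by_cases hvx : v = x
      · subst hvx
        rw [PySem.Dict.get?_insert_self]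
        have hget : d.get? v = none := by
          rw [PySem.Dict.contains_eq_isSome_get?] at hc
          cases h : d.get? v
          · rfl
          · rw [h] at hc; simp at hc
        rw [hget, PySem.List.index?_cons_self]
        simp
      · rw [PySem.Dict.get?_insert_of_ne d i hvx,
            PySem.List.index?_cons_of_ne xs (fun h => hvx h.symm)]
        cases hget : d.get? v with
        | some w => simp
        | none =>
          simp only [Option.none_or, Option.map_map]
          congr 1
          funext a
          simp
          omega

lemma check_eq (h s : List Int) (first : PySem.Dict Int Nat)
    (hfirst : ∀ v, first.get? v = PySem.List.index? h v) :
    ∀ (f i : Nat) (pA pB : List Nat), Wf pA → Wf pB →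
    (∀ a b, root pA a = root pA b ↔ root pB a = root pB b) →
    checkA h s f i pA = checkB h s first f i pB := by
  intro f
  induction f with
  | zero => intro i pA pB _ _ _; rfl
  | succ f ih =>
    intro i pA pB hwA hwB hrel
    simp only [checkA, checkB, hfirst]
    by_cases hne : h.getD i 0 ≠ s.getD i 0
    · simp only [if_pos hne]
      cases hidx : PySem.List.index? h (s.getD i 0) with
      | none => rfl
      | some j =>
        simp only []
        obtain ⟨a1, a2, a3, a4⟩ := find_spec pA.length pA i hwA (root_isRoot hwA i)
        obtain ⟨a1', a2', a3', a4'⟩ := find_spec (dsuFind pA.length pA i).2.length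
          (dsuFind pA.length pA i).2 j a3 (root_isRoot a3 j)
        obtain ⟨b1, b2, b3, b4⟩ := find_spec pB.length pB i hwB (root_isRoot hwB i)
        obtain ⟨b1', b2', b3', b4'⟩ := find_spec (dsuFind pB.length pB i).2.length
          (dsuFind pB.length pB i).2 j b3 (root_isRoot b3 j)
        have hvA : (dsuFind pA.length pA i).1 =
            (dsuFind (dsuFind pA.length pA i).2.length (dsuFind pA.length pA i).2 j).1 ↔
            root pA i = root pA j := by
          rw [a1, a1', a4 j]
        have hvB : (dsuFind pB.length pB i).1 =
            (dsuFind (dsuFind pB.length pB i).2.length (dsuFind pB.length pB i).2 j).1 ↔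
            root pB i = root pB j := by
          rw [b1, b1', b4 j]
        by_cases hcond : root pA i = root pA j
        · have hcondB : root pB i = root pB j := (hrel i j).mp hcond
          rw [if_neg (show ¬ _ ≠ _ from fun hcc => hcc (hvA.mpr hcond)),
              if_neg (show ¬ _ ≠ _ from fun hcc => hcc (hvB.mpr hcondB))]
          apply ih
          · exact a3'
          · exact b3'
          · intro a b
            rw [a4' a, a4 a, a4' b, a4 b, b4' a, b4 a, b4' b, b4 b]
            exact hrel a b
        · have hcondB : ¬ root pB i = root pB j := fun hc => hcond ((hrel i j).mpr hc)
          rw [if_pos (show _ ≠ _ from fun hcc => hcond (hvA.mp hcc)),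
              if_pos (show _ ≠ _ from fun hcc => hcondB (hvB.mp hcc))]
    · simp only [if_neg hne]
      apply ih <;> assumption

def esA (h : List Int) : List (Nat × Nat) :=
  (pairsA h.length).filter (fun e => decide (Int.gcd (h.getD e.1 0) (h.getD e.2 0) ≠ 1))

def esAll (h : List Int) : List (Nat × Nat) :=
  (buildP h 0 PySem.Dict.empty none []).1 ++
    (match (buildP h 0 PySem.Dict.empty none []).2.2.1 with
     | none => []
     | some zi => (buildP h 0 PySem.Dict.empty none []).2.2.2.map (fun b => (b, zi)))

lemma mem_esA (h : List Int) (e : Nat × Nat) :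
    e ∈ esA h ↔ e.1 < e.2 ∧ e.2 < h.length ∧ Int.gcd (h.getD e.1 0) (h.getD e.2 0) ≠ 1 := by
  unfold esA
  rw [List.mem_filter, mem_pairsA]
  simp only [decide_eq_true_eq]
  tauto

lemma foldl_congr' {α β : Type} (l : List β) (f g : α → β → α) :
    (∀ a b, b ∈ l → f a b = g a b) → ∀ init, l.foldl f init = l.foldl g init := by
  induction l with
  | nil => intro _ init; rfl
  | cons x xs ih =>
    intro h init
    simp only [List.foldl_cons]
    rw [h init x List.mem_cons_self]
    exact ih (fun a b hb => h a b (List.mem_cons_of_mem _ hb)) _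

-- A's union phase equals the fold of esA

lemma aphase_eq (h : List Int) :
    (List.range h.length).foldl (fun p i =>
      (List.range' (i+1) (h.length - (i+1))).foldl (fun p j =>
        if Int.gcd (h.getD i 0) (h.getD j 0) ≠ 1 then dsuUnion h.length p i j else p) p)
      (List.range h.length) =
    (esA h).foldl (fun p e => dsuUnion h.length p e.1 e.2) (List.range h.length) := by
  unfold esA pairsA
  rw [← foldl_if_filter (fun e => decide (Int.gcd (h.getD e.1 0) (h.getD e.2 0) ≠ 1))
        (fun p e => dsuUnion h.length p e.1 e.2)]
  rw [List.foldl_flatMap]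
  apply foldl_congr'
  intro p i _
  rw [List.foldl_map]
  apply foldl_congr'
  intro p' j _
  by_cases hc : Int.gcd (h.getD i 0) (h.getD j 0) ≠ 1
  · rw [if_pos hc, if_pos (by simpa using hc)]
  · rw [if_neg hc, if_neg (by simpa using hc)]

lemma gcd_eq_natAbs_gcd (a b : Int) : Int.gcd a b = Nat.gcd a.natAbs b.natAbs := rfl

lemma closures_eq (h : List Int) : ∀ a b,
    Relation.EqvGen (fun u v => (u, v) ∈ esA h) a b ↔
    Relation.EqvGen (fun u v => (u, v) ∈ esAll h) a b := by
  have hdrop : h = h.drop 0 := List.drop_zero.symm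
  have hempty : OwOk h PySem.Dict.empty := by
    intro d j hj
    rw [PySem.Dict.get?_empty] at hj
    cases hj
  obtain ⟨hsE, hsOw, hsZ, hsBig⟩ := buildP_sound h h 0 PySem.Dict.empty none [] hdrop hempty
    (fun zi hzi => by cases hzi) (fun b hb => by cases hb)
  have hallE : ∀ e ∈ esAll h, e.1 < h.length ∧ e.2 < h.length ∧
      Int.gcd (h.getD e.1 0) (h.getD e.2 0) ≠ 1 := by
    intro e he
    rcases List.mem_append.mp he with he' | he'
    · exact hsE e he'
    · cases hz : (buildP h 0 PySem.Dict.empty none []).2.2.1 with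
      | none => rw [hz] at he'; cases he'
      | some zi =>
        rw [hz] at he'
        rw [List.mem_map] at he'
        obtain ⟨b, hb, rfl⟩ := he'
        obtain ⟨hb1, hb2⟩ := hsBig b hb
        obtain ⟨hz1, hz2⟩ := hsZ zi hz
        refine ⟨hb1, hz1, ?_⟩
        simp only [hz2]
        rw [gcd_eq_natAbs_gcd]
        simp only [Int.natAbs_zero, Nat.gcd_zero_right]
        omega
  have hRrefl : ∀ a, Relation.EqvGen (fun u v => (u, v) ∈ esAll h) a a :=
    fun a => Relation.EqvGen.refl a
  have hRsymm := fun a b => Relation.EqvGen.symm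
    (r := fun u v => (u, v) ∈ esAll h) a b
  have hRtrans := fun a b c => Relation.EqvGen.trans
    (r := fun u v => (u, v) ∈ esAll h) a b c
  obtain ⟨hcOw, hcZ, hcBig⟩ := buildP_complete h (Relation.EqvGen (fun u v => (u, v) ∈ esAll h))
    hRrefl hRsymm hRtrans h 0 PySem.Dict.empty none [] hdrop
    (fun e he => Relation.EqvGen.rel e.1 e.2 (List.mem_append_left _ he))
    (fun i hi => by omega) (fun i hi => by omega) (fun b hb => by omega)
  intro a b
  constructor
  · -- A-edges are generated by esAll
    apply eqvGen_clos
    intro u v huv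
    rw [mem_esA] at huv
    obtain ⟨huv1, huv2, huv3⟩ := huv
    by_cases hu0 : h.getD u 0 = 0 <;> by_cases hv0 : h.getD v 0 = 0
    · -- both zero
      obtain ⟨zi, hzi, hru⟩ := hcZ u (by omega) hu0
      obtain ⟨zi', hzi', hrv⟩ := hcZ v (by omega) hv0
      rw [hzi] at hzi'
      cases hzi'
      exact hRtrans u zi v hru (hRsymm v zi hrv)
    · -- u zero, v nonzero
      have hvabs : 2 ≤ (h.getD v 0).natAbs := by
        rw [gcd_eq_natAbs_gcd, hu0] at huv3
        simp only [Int.natAbs_zero, Nat.gcd_zero_left] at huv3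
        have : (h.getD v 0).natAbs ≠ 0 := fun hh => hv0 (Int.natAbs_eq_zero.mp hh)
        omega
      obtain ⟨zi, hzi, hru⟩ := hcZ u (by omega) hu0
      have hvbig : v ∈ (buildP h 0 PySem.Dict.empty none []).2.2.2 := hcBig v (by omega) hvabs
      have hedge : (v, zi) ∈ esAll h := by
        apply List.mem_append_right
        rw [hzi]
        exact List.mem_map.mpr ⟨v, hvbig, rfl⟩
      exact hRtrans u zi v hru (hRsymm v zi (Relation.EqvGen.rel _ _ hedge))
    · -- u nonzero, v zero
      have huabs : 2 ≤ (h.getD u 0).natAbs := by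
        rw [gcd_eq_natAbs_gcd, hv0] at huv3
        simp only [Int.natAbs_zero, Nat.gcd_zero_right] at huv3
        have : (h.getD u 0).natAbs ≠ 0 := fun hh => hu0 (Int.natAbs_eq_zero.mp hh)
        omega
      obtain ⟨zi, hzi, hrv⟩ := hcZ v (by omega) hv0
      have hubig : u ∈ (buildP h 0 PySem.Dict.empty none []).2.2.2 := hcBig u (by omega) huabs
      have hedge : (u, zi) ∈ esAll h := by
        apply List.mem_append_right
        rw [hzi]
        exact List.mem_map.mpr ⟨u, hubig, rfl⟩
      exact hRtrans u zi v (Relation.EqvGen.rel _ _ hedge) (hRsymm v zi hrv)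
    · -- both nonzero: common divisor = their gcd
      have hg0 : Int.gcd (h.getD u 0) (h.getD v 0) ≠ 0 := by
        rw [gcd_eq_natAbs_gcd]
        intro hg
        rw [Nat.gcd_eq_zero_iff] at hg
        exact hu0 (Int.natAbs_eq_zero.mp hg.1)
      have hg2 : 2 ≤ Int.gcd (h.getD u 0) (h.getD v 0) := by
        set g := Int.gcd (h.getD u 0) (h.getD v 0) with hgdef
        rcases Nat.lt_or_ge g 2 with hlt | hge
        · exfalso
          match g, hlt, hg0, huv3 with
          | 0, _, hg0, _ => exact hg0 rfl
          | 1, _, _, huv3 => exact huv3 rfl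
        · exact hge
      have hdu : Int.gcd (h.getD u 0) (h.getD v 0) ∣ (h.getD u 0).natAbs :=
        Nat.gcd_dvd_left _ _
      have hdv : Int.gcd (h.getD u 0) (h.getD v 0) ∣ (h.getD v 0).natAbs :=
        Nat.gcd_dvd_right _ _
      obtain ⟨j, hj1, hj2⟩ := hcOw u (by omega) hu0 _ hg2 hdu
      obtain ⟨j', hj1', hj2'⟩ := hcOw v (by omega) hv0 _ hg2 hdv
      rw [hj1] at hj1'
      cases hj1'
      exact hRtrans u j v hj2 (hRsymm v j hj2')
  · -- esAll-edges are generated by esA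
    apply eqvGen_clos
    intro u v huv
    obtain ⟨h1, h2, h3⟩ := hallE (u, v) huv
    rcases Nat.lt_trichotomy u v with hlt | heq | hgt
    · exact Relation.EqvGen.rel u v ((mem_esA h (u, v)).mpr ⟨hlt, h2, h3⟩)
    · exact heq ▸ Relation.EqvGen.refl u
    · refine Relation.EqvGen.symm _ _ (Relation.EqvGen.rel v u ((mem_esA h (v, u)).mpr ⟨hgt, h1, ?_⟩))
      rw [Int.gcd_comm]
      exact h3

theorem main_eq (h : List Int) :
    can_sort_with_coprime_restriction h = can_sort_with_coprime_restriction_alt h := by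
  -- rewrite A's union phase as a fold over esA
  have hA : can_sort_with_coprime_restriction h =
      checkA h (PySem.List.sorted h (fun x => x) false) h.length 0
        ((esA h).foldl (fun p e => dsuUnion h.length p e.1 e.2) (List.range h.length)) := by
    show checkA h (PySem.List.sorted h (fun x => x) false) h.length 0 _ = _
    rw [aphase_eq h]
  -- rewrite B's union phase as a fold over esAll
  have hB : can_sort_with_coprime_restriction_alt h =
      checkB h (PySem.List.sorted h (fun x => x) false) (firstDict h 0 PySem.Dict.empty) h.length 0
        ((esAll h).foldl (fun p e => dsuUnion h.length p e.1 e.2) (List.range h.length)) := by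
    show checkB h (PySem.List.sorted h (fun x => x) false) (firstDict h 0 PySem.Dict.empty) h.length 0
        (match (buildB h.length h 0 (List.range h.length) PySem.Dict.empty none []).2.2.1 with
          | none => (buildB h.length h 0 (List.range h.length) PySem.Dict.empty none []).1
          | some zi => (buildB h.length h 0 (List.range h.length) PySem.Dict.empty none []).2.2.2.foldl
              (fun p i => dsuUnion h.length p i zi)
              (buildB h.length h 0 (List.range h.length) PySem.Dict.empty none []).1) = _
    rw [build_decomp h.length h 0 (List.range h.length) PySem.Dict.empty none []]
    dsimp only
    unfold esAll
    rw [List.foldl_append]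
    cases hz : (buildP h 0 PySem.Dict.empty none []).2.2.1 with
    | none => rfl
    | some zi =>
      dsimp only
      rw [List.foldl_map]
  -- semantics of the two folds
  have hboundsA : ∀ e ∈ esA h, e.1 < h.length ∧ e.2 < h.length := by
    intro e he
    rw [mem_esA] at he
    omega
  have hdrop : h = h.drop 0 := List.drop_zero.symm
  have hempty : OwOk h PySem.Dict.empty := by
    intro d j hj
    rw [PySem.Dict.get?_empty] at hj
    cases hj
  obtain ⟨hsE, hsOw, hsZ, hsBig⟩ := buildP_sound h h 0 PySem.Dict.empty none [] hdrop hempty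
    (fun zi hzi => by cases hzi) (fun b hb => by cases hb)
  have hboundsB : ∀ e ∈ esAll h, e.1 < h.length ∧ e.2 < h.length := by
    intro e he
    rcases List.mem_append.mp he with he' | he'
    · obtain ⟨x1, x2, _⟩ := hsE e he'
      exact ⟨x1, x2⟩
    · cases hz : (buildP h 0 PySem.Dict.empty none []).2.2.1 with
      | none => rw [hz] at he'; cases he'
      | some zi =>
        rw [hz] at he'
        rw [List.mem_map] at he'
        obtain ⟨b, hb, rfl⟩ := he'
        exact ⟨(hsBig b hb).1, (hsZ zi hz).1⟩
  obtain ⟨fA1, fA2, fA3⟩ := fold_spec h.length (esA h) (List.range h.length)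
    (List.length_range) (wf_range h.length) hboundsA
  obtain ⟨fB1, fB2, fB3⟩ := fold_spec h.length (esAll h) (List.range h.length)
    (List.length_range) (wf_range h.length) hboundsB
  rw [hA, hB]
  apply check_eq
  · intro v
    rw [firstDict_get?, PySem.Dict.get?_empty, Option.none_or]
    have : (fun x => x + 0) = (id : Nat → Nat) := by funext a; simp
    rw [this, Option.map_id]
    rfl
  · exact fA2
  · exact fB2
  · intro a b
    rw [fA3 a b, fB3 a b]
    have hiffA : ∀ u v : Nat, ((u, v) ∈ esA h ∨ root (List.range h.length) u = root (List.range h.length) v)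
        ↔ ((u, v) ∈ esA h ∨ u = v) := by
      intro u v
      rw [root_range, root_range]
    have hiffB : ∀ u v : Nat, ((u, v) ∈ esAll h ∨ root (List.range h.length) u = root (List.range h.length) v)
        ↔ ((u, v) ∈ esAll h ∨ u = v) := by
      intro u v
      rw [root_range, root_range]
    constructor
    · intro hx
      have h1 := eqvGen_clos (fun u v huv => Relation.EqvGen.rel u v ((hiffA u v).mp huv)) a b hx
      have h2 := (eqvGen_or_eq _ a b).mp h1
      have h3 := (closures_eq h a b).mp h2
      have h4 := (eqvGen_or_eq (fun u v => (u, v) ∈ esAll h) a b).mpr h3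
      exact eqvGen_clos (fun u v huv => Relation.EqvGen.rel u v ((hiffB u v).mpr huv)) a b h4
    · intro hx
      have h1 := eqvGen_clos (fun u v huv => Relation.EqvGen.rel u v ((hiffB u v).mp huv)) a b hx
      have h2 := (eqvGen_or_eq _ a b).mp h1
      have h3 := (closures_eq h a b).mpr h2
      have h4 := (eqvGen_or_eq (fun u v => (u, v) ∈ esA h) a b).mpr h3
      exact eqvGen_clos (fun u v huv => Relation.EqvGen.rel u v ((hiffA u v).mpr huv)) a b h4

-- ===== VERDICT (by name: the statement is the Claim_ definition above) =====
theorem can_sort_with_coprime_restriction_spec : Claim_equal_can_sort_with_coprime_restriction := by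
  intro health _hdom
  unfold Spec_can_sort_with_coprime_restriction
  exact main_eq health
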